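-- pv_equiv track=rewrite | github.com/k018c1072/Paiza_Python | Mysterious_addition.py | Convert_quinary_to_character
-- ===== SOURCE A (Python) =====
-- num_dic = {"A": 0, "B": 1, "C": 2, "D": 3, "E": 4}
--
-- def Convert_quinary_to_character(hoge):
--     char = []
--     for i in hoge:
--         for key, value in num_dic.items():
--             if i == value:
--                 char.append(key)
--                 break
--     return char
-- ===== SOURCE B (Python) =====
-- def Convert_quinary_to_character(hoge):
--     # Closed form: letters A..E are consecutive ASCII codes, so the digit i
--     # maps to chr(ord('A') + i); no mapping table or scan at all.
--     return [chr(65 + i) for i in hoge if 0 <= i <= 4]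
-- ===== Notes on version B (the rewrite author's own statement) =====
-- stated objective: faster
-- what changed: B drops the mapping table entirely: it computes each letter arithmetically as chr(65+i) under a range guard 0<=i<=4, replacing A's inner first-match scan over num_dic.items() with a constant-time arithmetic closed form.
import Mathlib
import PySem

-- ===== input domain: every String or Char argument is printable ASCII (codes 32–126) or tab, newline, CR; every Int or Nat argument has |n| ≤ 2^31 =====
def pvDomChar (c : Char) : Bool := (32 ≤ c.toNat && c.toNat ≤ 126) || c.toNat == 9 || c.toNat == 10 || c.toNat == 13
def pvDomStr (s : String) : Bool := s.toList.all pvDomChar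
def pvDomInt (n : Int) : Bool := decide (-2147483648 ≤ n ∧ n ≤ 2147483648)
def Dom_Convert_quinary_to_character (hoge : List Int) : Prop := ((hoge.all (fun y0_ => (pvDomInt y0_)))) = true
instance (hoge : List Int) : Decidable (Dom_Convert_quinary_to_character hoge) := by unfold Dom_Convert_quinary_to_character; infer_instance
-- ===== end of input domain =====

-- B drops the mapping table: each in-range digit i becomes the letter chr(65+i)
-- by arithmetic on ASCII codes (same results, no inner scan).

-- ===== PORT A =====
-- num_dic = {"A": 0, "B": 1, "C": 2, "D": 3, "E": 4}
def numDic : List (String × Int) := [("A", 0), ("B", 1), ("C", 2), ("D", 3), ("E", 4)]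

-- inner 'for key, value in num_dic.items(): if i == value: …; break' — first matching key
def aScan (i : Int) : List (String × Int) → Option String
  | [] => none
  | (k, v) :: rest => if i == v then some k else aScan i rest

def Convert_quinary_to_character (hoge : List Int) : List String :=
  hoge.foldl (fun char i =>
    match aScan i numDic with
    | some k => char ++ [k]
    | none => char) []

-- ===== PORT B =====
-- [chr(65 + i) for i in hoge if 0 <= i <= 4]
def Convert_quinary_to_character_alt (hoge : List Int) : List String :=
  hoge.filterMap (fun i =>
    if 0 ≤ i ∧ i ≤ 4 then some (String.mk [Char.ofNat (65 + i.toNat)]) else none)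

-- ===== PRECONDITION & SPEC =====
def Spec_Convert_quinary_to_character (hoge : List Int) (out : List String) : Prop := out = Convert_quinary_to_character_alt hoge
instance (hoge : List Int) (out : List String) : Decidable (Spec_Convert_quinary_to_character hoge out) := by unfold Spec_Convert_quinary_to_character; infer_instance

-- ===== CLAIM =====
def Claim_equal_Convert_quinary_to_character : Prop := ∀ (hoge : List Int), Dom_Convert_quinary_to_character hoge → Spec_Convert_quinary_to_character hoge (Convert_quinary_to_character hoge)

-- ===== LEMMAS AND PROOFS =====

-- A's inner first-match scan agrees with B's arithmetic closed form, element by element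
theorem aScan_eq_arith (i : Int) :
    aScan i numDic
      = (if 0 ≤ i ∧ i ≤ 4 then some (String.mk [Char.ofNat (65 + i.toNat)]) else none) := by
  have h : i = 0 ∨ i = 1 ∨ i = 2 ∨ i = 3 ∨ i = 4 ∨ ¬(0 ≤ i ∧ i ≤ 4) := by omega
  rcases h with h | h | h | h | h | h
  · subst h; decide
  · subst h; decide
  · subst h; decide
  · subst h; decide
  · subst h; decide
  · simp only [if_neg h, numDic, aScan]
    split_ifs with h0 h1 h2 h3 h4 <;> simp_all

-- the append-accumulator fold is filterMap of the per-element option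
theorem foldl_opt_append (f : Int → Option String) (xs : List Int) (acc : List String) :
    xs.foldl (fun char i => match f i with | some k => char ++ [k] | none => char) acc
      = acc ++ xs.filterMap f := by
  induction xs generalizing acc with
  | nil => simp
  | cons x xs ih =>
    cases h : f x <;> simp [List.foldl, h, ih]

-- ===== VERDICT =====
theorem Convert_quinary_to_character_spec : Claim_equal_Convert_quinary_to_character := by
  intro hoge _
  unfold Spec_Convert_quinary_to_character Convert_quinary_to_character
    Convert_quinary_to_character_alt
  rw [foldl_opt_append]
  simp [funext aScan_eq_arith]
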